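-- pv_equiv track=rewrite | github.com/yuri-pavar/poetry-assistant | bot/handlers/utils.py | convert_poetry_blocks
-- ===== SOURCE A (Python) =====
-- def convert_poetry_blocks(text: str) -> str:
--     lines = text.splitlines()
--     in_poetry = False
--     result = []
--     block = []
--
--     for line in lines:
--         if line.startswith(">"):
--             in_poetry = True
--             block.append(line[1:].strip())
--         else:
--             if in_poetry:
--                 result.append("<pre>" + "\n".join(block) + "</pre>")
--                 block = []
--                 in_poetry = False
--             result.append(line)
--     if block:
--         result.append("<pre>" + "\n".join(block) + "</pre>")
--
--     return "\n".join(result)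
-- ===== SOURCE B (Python) =====
-- def convert_poetry_blocks(text: str) -> str:
--     lines = text.splitlines()
--     parts = []
--     i = 0
--     n = len(lines)
--     while i < n:
--         if lines[i].startswith(">"):
--             j = i
--             while j < n and lines[j].startswith(">"):
--                 j += 1
--             parts.append("<pre>" + "\n".join(l[1:].strip() for l in lines[i:j]) + "</pre>")
--             i = j
--         else:
--             parts.append(lines[i])
--             i += 1
--     return "\n".join(parts)
-- ===== Notes on version B (the rewrite author's own statement) =====
-- stated objective: simpler
-- what changed: Replaced A's in_poetry/block state machine (with a trailing flush after the loop) by a run-splitting loop that consumes each maximal run of quote-prefixed lines at once and emits its <pre> block immediately.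
import Mathlib
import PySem

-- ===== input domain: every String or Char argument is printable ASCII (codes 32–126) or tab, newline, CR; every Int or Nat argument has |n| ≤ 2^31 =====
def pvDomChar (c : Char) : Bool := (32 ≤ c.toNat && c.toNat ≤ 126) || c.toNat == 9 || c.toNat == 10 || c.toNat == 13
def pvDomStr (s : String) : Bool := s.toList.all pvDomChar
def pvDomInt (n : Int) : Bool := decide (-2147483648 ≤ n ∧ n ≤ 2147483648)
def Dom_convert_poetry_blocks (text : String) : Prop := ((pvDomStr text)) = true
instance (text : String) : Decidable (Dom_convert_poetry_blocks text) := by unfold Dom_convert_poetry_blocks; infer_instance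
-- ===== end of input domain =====

-- B replaces A's in_poetry/block state machine by a run-splitting loop that
-- consumes each maximal quoted run at once (objective: simpler, same cost).

-- ===== PORT A =====
-- "<pre>" + "\n".join(block) + "</pre>"
def pvPreA (block : List String) : String :=
  "<pre>" ++ PySem.Str.join "\n" block ++ "</pre>"

-- the for-loop of A, state = (in_poetry, result, block); the trailing
-- 'if block:' flush is the [] case
def pvGoA : List String → Bool → List String → List String → List String
  | [], _, result, block => if block ≠ [] then result ++ [pvPreA block] else result
  | line :: rest, in_poetry, result, block =>
    if PySem.Str.startswith line ">" then
      pvGoA rest true result (block ++ [PySem.Str.strip (PySem.Str.slice line (some 1) none)])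
    else if in_poetry then
      pvGoA rest false (result ++ [pvPreA block, line]) []
    else
      pvGoA rest false (result ++ [line]) block

def convert_poetry_blocks (text : String) : String :=
  PySem.Str.join "\n" (pvGoA (PySem.Str.splitlines text) false [] [])

-- ===== PORT B =====
-- l.startswith(">")
def pvIsQ (l : String) : Bool := PySem.Str.startswith l ">"
-- l[1:].strip()
def pvFmt (l : String) : String := PySem.Str.strip (PySem.Str.slice l (some 1) none)

-- the outer while-loop of B: on a quote line, the inner while-loop finds the
-- end of the run (takeWhile / dropWhile) and one <pre> piece is emitted
def pvGoB : List String → List String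
  | [] => []
  | l :: ls =>
    if pvIsQ l then
      ("<pre>" ++ PySem.Str.join "\n" ((l :: ls.takeWhile pvIsQ).map pvFmt) ++ "</pre>")
        :: pvGoB (ls.dropWhile pvIsQ)
    else l :: pvGoB ls
  termination_by ls => ls.length
  decreasing_by
  · exact Nat.lt_succ_of_le (List.length_dropWhile_le pvIsQ ls)
  · simp

def convert_poetry_blocks_alt (text : String) : String :=
  PySem.Str.join "\n" (pvGoB (PySem.Str.splitlines text))

-- ===== PRECONDITION & SPEC =====
def Spec_convert_poetry_blocks (text : String) (out : String) : Prop := out = convert_poetry_blocks_alt text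
instance (text : String) (out : String) : Decidable (Spec_convert_poetry_blocks text out) := by unfold Spec_convert_poetry_blocks; infer_instance

-- ===== CLAIM (what is proved, stated in full; the proofs are below) =====
def Claim_equal_convert_poetry_blocks : Prop := ∀ (text : String), Dom_convert_poetry_blocks text → Spec_convert_poetry_blocks text (convert_poetry_blocks text)

-- ===== LEMMAS AND PROOFS =====

-- A's state machine, run from either state, produces B's run decomposition.
-- Statement 2's block is the list of already-formatted quote lines collected
-- so far; it is nonempty exactly when in_poetry is true in A.
theorem pvGoA_eq_pvGoB (ls : List String) : ∀ (result block : List String),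
    (pvGoA ls false result [] = result ++ pvGoB ls) ∧
    (block ≠ [] → pvGoA ls true result block =
      result ++ ("<pre>" ++ PySem.Str.join "\n" (block ++ (ls.takeWhile pvIsQ).map pvFmt) ++ "</pre>")
        :: pvGoB (ls.dropWhile pvIsQ)) := by
  induction ls with
  | nil =>
      intro result block
      constructor
      · simp [pvGoA, pvGoB]
      · intro hb
        simp [pvGoA, pvGoB, pvPreA, hb]
  | cons l ls ih =>
      intro result block
      by_cases hq : pvIsQ l = true
      · have hqA : PySem.Str.startswith l ">" = true := hq
        constructor
        · rw [pvGoA, pvGoB, if_pos hqA, if_pos hq]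
          have h2 := (ih result [pvFmt l]).2 (by simp)
          simp only [pvFmt] at h2
          rw [List.nil_append, h2]
          simp [pvFmt]
        · intro hb
          rw [pvGoA, if_pos hqA]
          have h2 := (ih result (block ++ [pvFmt l])).2 (by simp)
          simp only [pvFmt] at h2
          rw [h2]
          simp [pvFmt, hq]
      · simp only [Bool.not_eq_true] at hq
        have hqA : PySem.Str.startswith l ">" = false := hq
        constructor
        · rw [pvGoA, pvGoB]
          simp only [hqA, hq, Bool.false_eq_true, reduceIte]
          rw [(ih (result ++ [l]) []).1]
          simp
        · intro hb
          rw [pvGoA]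
          simp only [hqA, Bool.false_eq_true, reduceIte]
          rw [(ih (result ++ [pvPreA block, l]) []).1]
          simp only [List.takeWhile_cons, List.dropWhile_cons, hq, Bool.false_eq_true, reduceIte]
          rw [pvGoB]
          simp only [hq, Bool.false_eq_true, reduceIte]
          simp [pvPreA]


-- ===== VERDICT (by name: the statement is the Claim_ definition above) =====
theorem convert_poetry_blocks_spec : Claim_equal_convert_poetry_blocks := by
  intro text _
  unfold Spec_convert_poetry_blocks convert_poetry_blocks convert_poetry_blocks_alt
  rw [(pvGoA_eq_pvGoB (PySem.Str.splitlines text) [] []).1]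
  simp
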